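-- pv_equiv track=rewrite | github.com/jingweiwu26/Practice_code | sort_list.py | fliptoright2
-- ===== SOURCE A (Python) =====
-- def fliptoright2(array):
--     maxposition=0
--     maxnumber=array[0]
--     for i in range(len(array)):
--         if array[i]>maxnumber:
--             maxposition=i
--             maxnumber=array[i]
--     temp=array[-1]
--     array[-1]=maxnumber
--     array[maxposition]=temp
--     return array
-- ===== SOURCE B (Python) =====
-- def fliptoright2(array):
--     temp = array[-1]
--     m = max(array)
--     out = []
--     placed = False
--     for x in array[:-1]:
--         if placed or x != m:
--             out.append(x)
--         else:
--             out.append(temp)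
--             placed = True
--     out.append(m)
--     array[:] = out
--     return array
-- ===== Notes on version B (the rewrite author's own statement) =====
-- stated objective: alternative
-- what changed: Instead of tracking the max position and doing two point writes, B computes the max value only, then rebuilds the whole list in one pass with a 'placed' flag (substituting the old last element at the first max, appending the max at the end) and assigns it back via array[:] = out; no index is ever computed.
import Mathlib
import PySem

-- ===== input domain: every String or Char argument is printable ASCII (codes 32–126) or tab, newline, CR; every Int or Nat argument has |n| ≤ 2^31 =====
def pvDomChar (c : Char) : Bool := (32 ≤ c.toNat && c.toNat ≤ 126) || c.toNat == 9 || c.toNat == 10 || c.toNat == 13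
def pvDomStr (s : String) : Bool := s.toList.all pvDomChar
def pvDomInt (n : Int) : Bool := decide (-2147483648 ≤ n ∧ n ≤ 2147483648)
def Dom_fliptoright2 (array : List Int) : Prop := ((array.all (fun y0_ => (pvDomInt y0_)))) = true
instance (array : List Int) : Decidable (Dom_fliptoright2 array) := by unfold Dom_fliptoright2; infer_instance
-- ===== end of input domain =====

-- B computes only the max value and rebuilds the list in one flag-guarded pass instead of tracking the max position and doing two point writes; equivalence is about the RETURN value (both also mutate their argument in Python).

-- ===== PORT A =====
-- literal port: running (maxposition, maxnumber) over range(len(array)), then the two writes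
def fliptoright2 (array : List Int) : List Int :=
  let st := (PySem.List.pyRange 0 (PySem.List.len array) 1).foldl
    (fun (s : Int × Int) i =>
      if PySem.List.pyGetD array i 0 > s.2 then (i, PySem.List.pyGetD array i 0) else s)
    (0, PySem.List.pyGetD array 0 0)
  let temp := PySem.List.pyGetD array (-1) 0
  let a1 := PySem.List.pySetD array (-1) st.2
  PySem.List.pySetD a1 st.1 temp

-- ===== PORT B =====
-- literal port of Source B: temp = array[-1]; m = max(array); flag-guarded rebuild over array[:-1]; append m; return the rebuilt list
def fliptoright2_alt (array : List Int) : List Int :=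
  let temp := PySem.List.pyGetD array (-1) 0
  let m := (PySem.List.max? array (fun y => y)).getD 0
  let st := (PySem.List.slice array none (some (-1))).foldl
    (fun (s : List Int × Bool) x =>
      if s.2 = true ∨ x ≠ m then (s.1 ++ [x], s.2) else (s.1 ++ [temp], true))
    ([], false)
  st.1 ++ [m]

-- ===== PRECONDITION & SPEC =====
-- Pre_ excludes only the empty list, on which both Pythons raise IndexError
def Pre_fliptoright2 (array : List Int) : Prop := array ≠ []
instance (array : List Int) : Decidable (Pre_fliptoright2 array) := by unfold Pre_fliptoright2; infer_instance
def pvWitness_fliptoright2 : List Int := [3, 7, 2]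

def Spec_fliptoright2 (array : List Int) (out : List Int) : Prop := out = fliptoright2_alt array
instance (array : List Int) (out : List Int) : Decidable (Spec_fliptoright2 array out) := by unfold Spec_fliptoright2; infer_instance

-- ===== CLAIM (what is proved, stated in full; the proofs are below) =====
def Claim_equal_fliptoright2 : Prop := ∀ (array : List Int), Dom_fliptoright2 array → Pre_fliptoright2 array → Spec_fliptoright2 array (fliptoright2 array)

-- ===== LEMMAS AND PROOFS =====

-- Characterisation of A's loop after n ≥ 1 steps: the state is the first position
-- of the maximum of the first n elements, together with that maximum.
theorem fliptoright2_loop (xs : List Int) (n : Nat) (hn : 1 ≤ n) (hlen : n ≤ xs.length) :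
    ∃ (p : Nat) (m : Int),
      (PySem.List.pyRange 0 (n : Int) 1).foldl
        (fun (s : Int × Int) i =>
          if PySem.List.pyGetD xs i 0 > s.2 then (i, PySem.List.pyGetD xs i 0) else s)
        (0, PySem.List.pyGetD xs 0 0)
      = ((p : Int), m)
      ∧ p < n ∧ xs.getD p 0 = m
      ∧ (∀ j : Nat, j < n → xs.getD j 0 ≤ m)
      ∧ (∀ j : Nat, j < p → xs.getD j 0 < m) := by
  induction n with
  | zero => omega
  | succ n ih =>
    have hx : ∀ k : Nat, PySem.List.pyGetD xs (k : Int) 0 = xs.getD k 0 := by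
      intro k
      simp [PySem.List.pyGetD_natCast, List.getD_eq_getElem?_getD]
    by_cases h1 : 1 ≤ n
    · obtain ⟨p, m, heq, hp, hpm, hub, hfirst⟩ := ih h1 (by omega)
      have hsplit : PySem.List.pyRange 0 ((n : Int) + 1) 1
          = PySem.List.pyRange 0 (n : Int) 1 ++ [(n : Int)] :=
        PySem.List.pyRange_one_succ_right (by omega)
      have hcast : ((n + 1 : Nat) : Int) = (n : Int) + 1 := by push_cast; ring
      rw [hcast, hsplit, List.foldl_append, heq]
      simp only [List.foldl_cons, List.foldl_nil, hx n]
      by_cases hgt : xs.getD n 0 > m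
      · rw [if_pos hgt]
        refine ⟨n, xs.getD n 0, rfl, by omega, rfl, ?_, ?_⟩
        · intro j hj
          rcases Nat.lt_succ_iff_lt_or_eq.mp hj with hj' | rfl
          · have := hub j hj'
            omega
          · exact le_refl _
        · intro j hj
          have := hub j hj
          omega
      · rw [if_neg hgt]
        refine ⟨p, m, rfl, by omega, hpm, ?_, hfirst⟩
        intro j hj
        rcases Nat.lt_succ_iff_lt_or_eq.mp hj with hj' | rfl
        · exact hub j hj'
        · omega
    · have hn1 : n = 0 := by omega
      subst hn1
      refine ⟨0, xs.getD 0 0, ?_, by omega, rfl, ?_, fun j hj => absurd hj (by omega)⟩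
      · have h01 : ((1 : Nat) : Int) = (0 : Int) + 1 := by norm_num
        rw [h01, PySem.List.pyRange_one_singleton 0]
        simp only [List.foldl_cons, List.foldl_nil]
        have h0 : PySem.List.pyGetD xs (0 : Int) 0 = xs.getD 0 0 := hx 0
        rw [h0]
        simp
      · intro j hj
        interval_cases j
        exact le_refl _

-- B's fold once the flag is set: copies the rest of the list unchanged
theorem fliptoright2_fold_true (m temp : Int) (ys acc : List Int) :
    ys.foldl (fun (s : List Int × Bool) x =>
      if s.2 = true ∨ x ≠ m then (s.1 ++ [x], s.2) else (s.1 ++ [temp], true))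
      (acc, true) = (acc ++ ys, true) := by
  induction ys generalizing acc with
  | nil => simp
  | cons y t ih => simp [ih]

-- B's fold while m has not appeared: copies unchanged, flag stays false
theorem fliptoright2_fold_notmem (m temp : Int) (ys acc : List Int) (h : m ∉ ys) :
    ys.foldl (fun (s : List Int × Bool) x =>
      if s.2 = true ∨ x ≠ m then (s.1 ++ [x], s.2) else (s.1 ++ [temp], true))
      (acc, false) = (acc ++ ys, false) := by
  induction ys generalizing acc with
  | nil => simp
  | cons y t ih =>
    have hy : y ≠ m := fun hh => h (hh ▸ List.mem_cons_self)
    simp only [List.foldl_cons, if_pos (Or.inr hy)]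
    rw [ih _ (fun hh => h (List.mem_cons_of_mem _ hh))]
    simp

-- B's fold on a list whose first occurrence of m is exposed: substitutes temp there
theorem fliptoright2_fold_first (m temp : Int) (u v acc : List Int) (h : m ∉ u) :
    (u ++ m :: v).foldl (fun (s : List Int × Bool) x =>
      if s.2 = true ∨ x ≠ m then (s.1 ++ [x], s.2) else (s.1 ++ [temp], true))
      (acc, false) = (acc ++ u ++ temp :: v, true) := by
  rw [List.foldl_append, fliptoright2_fold_notmem m temp u acc h]
  simp only [List.foldl_cons, ne_eq, not_true_eq_false, or_false, Bool.false_eq_true]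
  rw [if_neg (by simp), fliptoright2_fold_true]
  simp

-- pySetD at index -1 on a nonempty list replaces the last element
theorem pySetD_neg_one (xs : List Int) (v : Int) (h : xs ≠ []) :
    PySem.List.pySetD xs (-1) v = xs.dropLast ++ [v] := by
  have hl : 1 ≤ xs.length := List.length_pos_iff.mpr h
  simp only [PySem.List.pySetD, PySem.List.pySet?, PySem.List.pyIdx?]
  rw [if_neg (by norm_num), if_pos (by omega)]
  simp only [Option.map_some, Option.getD_some]
  norm_num
  rw [List.set_eq_take_append_cons_drop, if_pos (by omega)]
  have hd : xs.drop (xs.length - 1 + 1) = [] := by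
    apply List.drop_eq_nil_of_le; omega
  rw [hd, List.dropLast_eq_take]

-- pyGetD at index -1 on a nonempty list reads the last element
theorem pyGetD_neg_one (xs : List Int) (h : xs ≠ []) :
    PySem.List.pyGetD xs (-1) 0 = xs.getD (xs.length - 1) 0 := by
  have hl : 1 ≤ xs.length := List.length_pos_iff.mpr h
  simp only [PySem.List.pyGetD, PySem.List.pyGet?, PySem.List.pyIdx?]
  rw [if_neg (by norm_num), if_pos (by omega)]
  simp [List.getD_eq_getElem?_getD]

theorem fliptoright2_spec : Claim_equal_fliptoright2 := by
  intro xs _ hne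
  have hlen : 1 ≤ xs.length := List.length_pos_iff.mpr hne
  obtain ⟨p, m, heq, hp, hpm, hub, hfirst⟩ := fliptoright2_loop xs xs.length hlen le_rfl
  -- B's max equals A's running maximum m
  obtain ⟨v, hv⟩ : ∃ v, PySem.List.max? xs (fun y => y) = some v := by
    cases h : PySem.List.max? xs (fun y => y) with
    | none => exact absurd ((PySem.List.max?_eq_none_iff xs (fun y => y)).mp h) hne
    | some v => exact ⟨v, rfl⟩
  have hmem : m ∈ xs := by
    rw [← hpm, List.getD_eq_getElem xs 0 hp]
    exact List.getElem_mem hp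
  have hmv : v = m := by
    have h1 : m ≤ v := PySem.List.max?_isMax hv m hmem
    have h2 : v ≤ m := by
      obtain ⟨k, hk, hkv⟩ := List.mem_iff_getElem.mp (PySem.List.max?_mem hv)
      have := hub k hk
      rw [List.getD_eq_getElem xs 0 hk] at this
      omega
    omega
  have hys : xs.dropLast.length = xs.length - 1 := List.length_dropLast
  have hysget : ∀ (j : Nat) (hj : j < xs.length - 1),
      xs.dropLast[j]'(by omega) = xs[j]'(by omega) := by
    intro j hj
    exact List.getElem_dropLast (by omega)
  show _ = fliptoright2_alt xs
  simp only [fliptoright2, fliptoright2_alt, PySem.List.len_eq, heq, hv, hmv,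
    Option.getD_some, PySem.List.slice_to_neg_one]
  rw [pySetD_neg_one xs m hne, PySem.List.pySetD_natCast]
  by_cases hplt : p < xs.length - 1
  · -- the max occurs before the last position
    have hpd : p < xs.dropLast.length := by omega
    have hgp : xs.dropLast[p]'hpd = m := by
      rw [hysget p hplt, ← List.getD_eq_getElem xs 0 hp, hpm]
    have hdec : xs.dropLast = xs.dropLast.take p ++ m :: xs.dropLast.drop (p + 1) := by
      conv_lhs => rw [← List.take_append_drop p xs.dropLast]
      rw [← List.getElem_cons_drop hpd, hgp]
    have hnm : m ∉ xs.dropLast.take p := by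
      intro hmm
      obtain ⟨k, hk, hkv⟩ := List.mem_iff_getElem.mp hmm
      have hk' : k < p := by
        have := hk; simp [List.length_take] at this; omega
      rw [List.getElem_take] at hkv
      rw [hysget k (by omega)] at hkv
      have := hfirst k hk'
      rw [List.getD_eq_getElem xs 0 (by omega)] at this
      omega
    conv_rhs => rw [hdec]
    rw [fliptoright2_fold_first m _ _ _ _ hnm]
    rw [List.set_append, if_pos hpd,
        List.set_eq_take_append_cons_drop, if_pos hpd]
    simp
  · -- the max occurs only at the last position: the list content is unchanged
    have hpe : p = xs.length - 1 := by omega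
    have hnm : m ∉ xs.dropLast := by
      intro hmm
      obtain ⟨k, hk, hkv⟩ := List.mem_iff_getElem.mp hmm
      rw [hysget k (by omega)] at hkv
      have := hfirst k (by omega)
      rw [List.getD_eq_getElem xs 0 (by omega)] at this
      omega
    rw [fliptoright2_fold_notmem m _ _ _ hnm]
    have htm : PySem.List.pyGetD xs (-1) 0 = m := by
      rw [pyGetD_neg_one xs hne, ← hpe, hpm]
    rw [htm, List.set_append, if_neg (by omega)]
    have hidx : p - xs.dropLast.length = 0 := by omega
    rw [hidx]
    simp
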